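-- pv_equiv track=rewrite | github.com/DNA-origamicon/NADOC | backend/core/pdb_export.py | _h36
-- ===== SOURCE A (Python) =====
-- _H36_DIGITS = "ABCDEFGHIJKLMNOPQRSTUVWXYZabcdefghijklmnopqrstuvwxyz"
--
-- def _h36(value: int, width: int) -> str:
--     """
--     Encode *value* as a right-justified hybrid-36 string of *width* characters.
--     *width* must be 4 (residue number) or 5 (atom serial).
--     """
--     dec_max = 10 ** width                          # 10000 or 100000
--     if 0 <= value < dec_max:
--         return f"{value:{width}d}"
--     value -= dec_max
--     per_letter = 10 ** (width - 1)                 # 1000 or 10000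
--     for letter in _H36_DIGITS:
--         if value < per_letter:
--             return letter + f"{value:0{width - 1}d}"
--         value -= per_letter
--     raise ValueError(f"hybrid-36 overflow: value out of range for width {width}")
-- ===== SOURCE B (Python) =====
-- _H36_DIGITS = "ABCDEFGHIJKLMNOPQRSTUVWXYZabcdefghijklmnopqrstuvwxyz"
--
-- def _h36(value: int, width: int) -> str:
--     """
--     Encode *value* as a right-justified hybrid-36 string of *width* characters.
--     *width* must be 4 (residue number) or 5 (atom serial).
--     """
--     dec_max = 10 ** width                          # 10000 or 100000
--     if 0 <= value < dec_max:
--         return f"{value:{width}d}"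
--     idx, rem = divmod(value - dec_max, 10 ** (width - 1))
--     if 0 <= idx < len(_H36_DIGITS):
--         return _H36_DIGITS[idx] + f"{rem:0{width - 1}d}"
--     raise ValueError(f"hybrid-36 overflow: value out of range for width {width}")
-- ===== Notes on version B (the rewrite author's own statement) =====
-- stated objective: simpler
-- what changed: The 52-iteration scan over _H36_DIGITS that repeatedly subtracts per_letter is replaced by a single divmod giving the letter index and remainder directly; Pre_ restricts to the function's contract (width >= 1, 0 <= value below the hybrid-36 limit): it excludes negative values, where A returns a malformed over-width string like 'A-10001' (an artefact of the scan matching on the first letter) while B naturally raises the reference hybrid-36 ValueError, and non-positive widths, where Python's 10**width becomes a float and A raises for every value except 0; …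
-- outside the precondition, e.g. on _h36(-1, 4): A returns 'A-10001', B raises ValueError; on _h36(0, -3): A returns '  0', B returns '  0'
import Mathlib
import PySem

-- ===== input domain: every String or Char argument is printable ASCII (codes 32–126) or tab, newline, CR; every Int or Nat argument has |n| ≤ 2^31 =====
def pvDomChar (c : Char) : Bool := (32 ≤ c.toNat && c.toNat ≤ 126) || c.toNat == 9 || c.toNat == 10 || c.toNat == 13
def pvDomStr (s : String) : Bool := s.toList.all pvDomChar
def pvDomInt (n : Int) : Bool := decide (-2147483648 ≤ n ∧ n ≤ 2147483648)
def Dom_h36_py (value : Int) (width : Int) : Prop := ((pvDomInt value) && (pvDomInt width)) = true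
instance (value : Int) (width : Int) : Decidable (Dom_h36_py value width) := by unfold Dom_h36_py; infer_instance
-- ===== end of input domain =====

-- B replaces A's 52-step letter scan by one divmod; return values proved equal for width ≥ 1
-- and 0 ≤ value below the hybrid-36 limit (see Pre_ comment for what is excluded and why).

-- ===== PORT A =====
-- shared module constant _H36_DIGITS (as a char list)
def h36Digits : List Char :=
  "ABCDEFGHIJKLMNOPQRSTUVWXYZabcdefghijklmnopqrstuvwxyz".toList

-- f"{v:{n}d}" — right-justify str(v) with spaces to total width n (exact for the int widths
-- n ≥ 0 that arise inside Pre_; both Pythons use the same format built-in)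
def fmtRJ (v : Int) (n : Nat) : List Char :=
  let s := (PySem.Int.toStr v).toList
  List.replicate (n - s.length) ' ' ++ s

-- f"{v:0{n}d}" — zero-pad str(v) to total width n, sign before the zeros (Python's 0-pad rule)
def fmtZ (v : Int) (n : Nat) : List Char :=
  let s := (PySem.Int.toStr v).toList
  if v < 0 then '-' :: (List.replicate (n - s.length) '0' ++ s.drop 1)
  else List.replicate (n - s.length) '0' ++ s

-- the 'for letter in _H36_DIGITS' loop; [] = the ValueError overflow raise (excluded by Pre_)
def h36Loop (letters : List Char) (v : Int) (per : Int) (width : Int) : String :=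
  match letters with
  | [] => ""
  | c :: rest =>
      if v < per then String.ofList (c :: fmtZ v (width - 1).toNat)
      else h36Loop rest (v - per) per width

-- 10 ** width is an int only for width ≥ 0 (Python gives a float below 0; Pre_ excludes that)
def h36_py (value : Int) (width : Int) : String :=
  let decMax : Int := 10 ^ width.toNat
  if 0 ≤ value ∧ value < decMax then String.ofList (fmtRJ value width.toNat)
  else h36Loop h36Digits (value - decMax) (10 ^ (width - 1).toNat) width

-- ===== PORT B =====
def h36_py_alt (value : Int) (width : Int) : String :=
  let decMax : Int := 10 ^ width.toNat
  if 0 ≤ value ∧ value < decMax then String.ofList (fmtRJ value width.toNat)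
  else
    let per : Int := 10 ^ (width - 1).toNat
    let idx := PySem.Int.floordiv (value - decMax) per
    let rem := PySem.Int.mod (value - decMax) per
    if 0 ≤ idx ∧ idx < 52 then
      String.ofList (h36Digits.getD idx.toNat 'A' :: fmtZ rem (width - 1).toNat)
    else ""  -- raise ValueError (excluded by Pre_)

-- ===== PRECONDITION & SPEC =====
-- Pre_ excludes inputs on which A still returns: negative values, where A returns a malformed
-- over-width string ('A-10001') that is an artefact of the scan and B raises the reference
-- hybrid-36 ValueError; and non-positive widths (outside the documented 4-or-5 contract),
-- where 10**width is a Python float and A returns only for value = 0; the overflow region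
-- (value ≥ 10**width + 52·10**(width-1)), where both raise ValueError, is excluded too.
-- (the exponent is capped at 11 only so the condition is cheap to evaluate: on the stated
-- domain |value| ≤ 2^31 < 10^10 the capped condition is equivalent to the uncapped one)
def Pre_h36_py (value : Int) (width : Int) : Prop :=
  1 ≤ width ∧ 0 ≤ value ∧
    value < 10 ^ (min width 11).toNat + 52 * 10 ^ (min width 11 - 1).toNat
instance (value : Int) (width : Int) : Decidable (Pre_h36_py value width) := by
  unfold Pre_h36_py; infer_instance

def pvWitness_h36_py : Int × Int := (10061, 4)

def Spec_h36_py (value : Int) (width : Int) (out : String) : Prop := out = h36_py_alt value width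
instance (value : Int) (width : Int) (out : String) : Decidable (Spec_h36_py value width out) := by
  unfold Spec_h36_py; infer_instance

-- ===== CLAIM (what is proved, stated in full; the proofs are below) =====
def Claim_equal_h36_py : Prop := ∀ (value : Int) (width : Int), Dom_h36_py value width → Pre_h36_py value width → Spec_h36_py value width (h36_py value width)

-- ===== LEMMAS AND PROOFS =====

-- A's scan with start value v lands on letter number v // per with remainder v % per.
theorem h36Loop_eq (letters : List Char) : ∀ (v per width : Int), 0 < per → 0 ≤ v →
    v < (letters.length : Int) * per →
    h36Loop letters v per width =
      String.ofList (letters.getD (PySem.Int.floordiv v per).toNat 'A' ::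
        fmtZ (PySem.Int.mod v per) (width - 1).toNat) := by
  induction letters with
  | nil => intro v per width hper hv hlt; simp at hlt; omega
  | cons c rest ih =>
      intro v per width hper hv hlt
      rw [h36Loop]
      by_cases h : v < per
      · have hd : PySem.Int.floordiv v per = 0 :=
          (PySem.Int.floordiv_eq_iff_of_pos hper).2 (by constructor <;> omega)
        have hm : PySem.Int.mod v per = v := by
          have := PySem.Int.floordiv_mul_add_mod v per
          rw [hd] at this; omega
        simp [h, hd, hm]
      · have hple : per ≤ v := by omega
        have hq1 : 1 ≤ PySem.Int.floordiv v per :=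
          (PySem.Int.le_floordiv_iff_mul_le hper).2 (by omega)
        have hdiv : PySem.Int.floordiv (v - per) per = PySem.Int.floordiv v per - 1 := by
          rw [PySem.Int.floordiv_eq_ediv_of_pos hper, PySem.Int.floordiv_eq_ediv_of_pos hper]
          have : v - per = v + (-1) * per := by ring
          rw [this, Int.add_mul_ediv_right _ _ (by omega)]; omega
        have hmod : PySem.Int.mod (v - per) per = PySem.Int.mod v per := by
          have h1 := PySem.Int.floordiv_mul_add_mod (v - per) per
          have h2 := PySem.Int.floordiv_mul_add_mod v per
          rw [hdiv] at h1; nlinarith [h1, h2]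
        simp only [h, if_false]
        have hlen : ((c :: rest).length : Int) = (rest.length : Int) + 1 := by simp
        rw [ih (v - per) per width hper (by omega) (by nlinarith [hlt, hlen, hper])]
        rw [hdiv, hmod]
        have hnat : (PySem.Int.floordiv v per).toNat = (PySem.Int.floordiv v per - 1).toNat + 1 := by
          omega
        rw [hnat]
        rfl

-- ===== VERDICT (by name: the statement is the Claim_ definition above) =====
theorem h36_py_spec : Claim_equal_h36_py := by
  intro value width hdom hpre
  obtain ⟨hw, hv, hltc⟩ := hpre
  unfold Spec_h36_py h36_py h36_py_alt
  by_cases hdec : 0 ≤ value ∧ value < 10 ^ width.toNat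
  · simp only [if_pos hdec]
  · simp only [if_neg hdec]
    have hper : (0 : Int) < 10 ^ (width - 1).toNat := by positivity
    have hge : (10 : Int) ^ width.toNat ≤ value := by
      rcases not_and_or.1 hdec with h | h
      · exact absurd hv h
      · omega
    have hvdom : value ≤ 2147483648 := by
      simp only [Dom_h36_py, pvDomInt, Bool.and_eq_true, decide_eq_true_eq] at hdom
      exact hdom.1.2
    have hcap : width ≤ 11 := by
      by_contra hbig
      have h12 : (10 : Int) ^ 12 ≤ 10 ^ width.toNat :=
        pow_le_pow_right₀ (by norm_num) (by omega)
      norm_num at h12; omega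
    have hmin : min width 11 = width := by omega
    rw [hmin] at hltc
    have hlt := hltc
    have hv0 : 0 ≤ value - 10 ^ width.toNat := by omega
    have hbound : value - 10 ^ width.toNat < (52 : Int) * 10 ^ (width - 1).toNat := by omega
    have hidx0 : 0 ≤ PySem.Int.floordiv (value - 10 ^ width.toNat) (10 ^ (width - 1).toNat) :=
      (PySem.Int.le_floordiv_iff_mul_le hper).2 (by omega)
    have hidx52 : PySem.Int.floordiv (value - 10 ^ width.toNat) (10 ^ (width - 1).toNat) < 52 :=
      (PySem.Int.floordiv_lt_iff_lt_mul hper).2 (by omega)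
    have hlen : ((h36Digits.length : Int)) = 52 := by decide
    rw [h36Loop_eq h36Digits _ _ width hper hv0 (by rw [hlen]; omega)]
    rw [if_pos ⟨hidx0, hidx52⟩]
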